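-- pv_equiv track=rewrite | github.com/ALT-F4-eng/ArtificialQI | back-end/ArtificialQI/adapter/inbound/test_service.py | count_math
-- ===== SOURCE A (Python) =====
-- def count_math(sentence: str) -> int:
--     math_characters = set("+-*/%^=<>")
--     count_numbers = 0
--     count_characters = 0
--     mem_number = []
--     for i, character in enumerate(sentence):
--         if character.isdigit():
--             mem_number.append(character)
--         if (character == " " or character in math_characters or i == len(sentence) - 1) and mem_number:
--             mem_number = []
--             count_numbers += 1
--         if character in math_characters:
--             count_characters += 1
--     return count_numbers + count_characters
-- ===== SOURCE B (Python) =====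
-- def count_math(sentence: str) -> int:
--     ops = "+-*/%^=<>"
--     op_count = sum(1 for ch in sentence if ch in ops)
--     cleaned = "".join(" " if ch in ops else ch for ch in sentence)
--     tokens = cleaned.split(" ")
--     num_tokens = sum(1 for t in tokens if any(ch.isdigit() for ch in t))
--     return num_tokens + op_count
-- ===== Notes on version B (the rewrite author's own statement) =====
-- stated objective: simpler
-- what changed: Replaced A's indexed single-pass scan with a digit-accumulator list and last-index flush logic by a decomposition: count operator characters directly, replace operators by spaces, split on spaces, and count tokens containing a digit.
import Mathlib
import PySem

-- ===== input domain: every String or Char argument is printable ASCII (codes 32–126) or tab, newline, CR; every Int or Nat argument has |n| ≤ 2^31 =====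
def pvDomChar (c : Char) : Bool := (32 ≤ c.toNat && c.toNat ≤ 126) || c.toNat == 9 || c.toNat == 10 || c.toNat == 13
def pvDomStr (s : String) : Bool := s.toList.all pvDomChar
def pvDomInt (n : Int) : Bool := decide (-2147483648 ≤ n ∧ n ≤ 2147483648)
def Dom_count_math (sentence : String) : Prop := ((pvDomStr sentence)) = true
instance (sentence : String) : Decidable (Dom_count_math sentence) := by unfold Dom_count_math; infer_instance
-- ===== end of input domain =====

-- B replaces A's indexed accumulator scan by a decomposition: count operator characters directly,
-- then split on space/operators and count tokens containing a digit (objective: simpler).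


-- ===== PORT A =====
def count_math (sentence : String) : Int :=
  let math_characters := PySem.Set.ofList "+-*/%^=<>".toList
  let cs := sentence.toList
  let st :=
    (PySem.List.enumerate cs).foldl
      (fun (st : Int × Int × List Char) ic =>
        let mem_number :=
          if PySem.Chars.isdigit ic.2 then st.2.2 ++ [ic.2] else st.2.2
        let p :=
          if (ic.2 == ' ' || math_characters.contains ic.2
                || ic.1 == (cs.length : Int) - 1) && !mem_number.isEmpty then
            (st.1 + 1, ([] : List Char))
          else (st.1, mem_number)
        let count_characters :=
          if math_characters.contains ic.2 then st.2.1 + 1 else st.2.1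
        (p.1, count_characters, p.2))
      (0, 0, [])
  st.1 + st.2.1

-- ===== PORT B =====
def count_math_alt (sentence : String) : Int :=
  let ops := "+-*/%^=<>".toList
  let op_count : Int :=
    sentence.toList.foldl (fun acc ch => acc + (if ops.contains ch then 1 else 0)) 0
  let cleaned : List Char := sentence.toList.map (fun ch => if ops.contains ch then ' ' else ch)
  let tokens := PySem.Chars.splitOn cleaned [' ']
  let num_tokens : Int :=
    tokens.foldl (fun acc t => acc + (if t.any PySem.Chars.isdigit then 1 else 0)) 0
  num_tokens + op_count

-- ===== PRECONDITION & SPEC =====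
def Spec_count_math (sentence : String) (out : Int) : Prop := out = count_math_alt sentence
instance (sentence : String) (out : Int) : Decidable (Spec_count_math sentence out) := by unfold Spec_count_math; infer_instance

-- ===== CLAIM (what is proved, stated in full; the proofs are below) =====
def Claim_equal_count_math : Prop := ∀ (sentence : String), Dom_count_math sentence → Spec_count_math sentence (count_math sentence)

-- ===== LEMMAS AND PROOFS =====

-- the nine operator characters
def pvOps : List Char := "+-*/%^=<>".toList

-- reference count of operator characters
def pvOpc : List Char → Int
  | [] => 0
  | c :: l => (if pvOps.contains c then 1 else 0) + pvOpc l

-- number-group count, B-shaped: pending group (if any) is flushed at the end of the list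
def pvF (pending : Bool) : List Char → Int
  | [] => if pending then 1 else 0
  | c :: l =>
    if c == ' ' || pvOps.contains c then
      (if pending then 1 else 0) + pvF false l
    else
      pvF (pending || PySem.Chars.isdigit c) l

-- number-group count, A-shaped: the flush happens while processing the LAST character
def pvFA (pending : Bool) : List Char → Int
  | [] => 0
  | c :: rest =>
    if (c == ' ' || pvOps.contains c || rest.isEmpty)
        && (pending || PySem.Chars.isdigit c) then
      1 + pvFA false rest
    else
      pvFA (pending || PySem.Chars.isdigit c) rest

-- simple recursive split on ' ' (reference for PySem.Chars.splitOn · [' '])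
def pvSp (cur : List Char) : List Char → List (List Char)
  | [] => [cur.reverse]
  | c :: l => if c == ' ' then cur.reverse :: pvSp [] l else pvSp (c :: cur) l

theorem pv_sep_not_digit (c : Char) (h : (c == ' ' || pvOps.contains c) = true) :
    PySem.Chars.isdigit c = false := by
  rcases Bool.or_eq_true_iff.1 h with h | h
  · rw [beq_iff_eq.1 h]; decide
  · have hmem : c ∈ pvOps := by
      rw [← List.contains_iff_mem]; exact h
    have hall : pvOps.all (fun c => !PySem.Chars.isdigit c) = true := by decide
    have := (List.all_eq_true.1 hall) c hmem
    simpa using this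

-- unfolding equations (definitional)
theorem pvF_nil (pending : Bool) : pvF pending [] = if pending then 1 else 0 := rfl
theorem pvF_cons (pending : Bool) (c : Char) (l : List Char) :
    pvF pending (c :: l)
      = if c == ' ' || pvOps.contains c then
          (if pending then 1 else 0) + pvF false l
        else pvF (pending || PySem.Chars.isdigit c) l := rfl
theorem pvFA_nil (pending : Bool) : pvFA pending [] = 0 := rfl
theorem pvFA_cons (pending : Bool) (c : Char) (l : List Char) :
    pvFA pending (c :: l)
      = if (c == ' ' || pvOps.contains c || l.isEmpty)
            && (pending || PySem.Chars.isdigit c) then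
          1 + pvFA false l
        else pvFA (pending || PySem.Chars.isdigit c) l := rfl

-- The two group counters agree when nothing is pending, or the list is nonempty
theorem pvFA_pvF (l : List Char) : ∀ pending : Bool,
    (pending = false ∨ l ≠ []) → pvFA pending l = pvF pending l := by
  induction l with
  | nil =>
    intro pending h
    rcases h with h | h
    · subst h; rfl
    · exact absurd rfl h
  | cons c rest ih =>
    intro pending _
    rw [pvFA_cons, pvF_cons]
    by_cases hsep : (c == ' ' || pvOps.contains c) = true
    · have hd : PySem.Chars.isdigit c = false := pv_sep_not_digit c hsep
      have hc1 : (c == ' ' || pvOps.contains c || rest.isEmpty) = true := by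
        rw [hsep, Bool.true_or]
      rw [hc1, Bool.true_and, hd, Bool.or_false, if_pos hsep]
      by_cases hp : pending = true
      · rw [hp, if_pos rfl, if_pos rfl, ih false (Or.inl rfl)]
      · rw [Bool.eq_false_iff.2 hp]
        rw [if_neg (by simp), if_neg (by simp), ih false (Or.inl rfl)]
        ring
    · have hsepf : (c == ' ' || pvOps.contains c) = false :=
        Bool.eq_false_iff.2 (fun h => hsep h)
      rw [if_neg hsep]
      cases rest with
      | nil =>
        have hc1 : (c == ' ' || pvOps.contains c || List.isEmpty ([] : List Char)) = true := by
          rw [List.isEmpty_nil, Bool.or_true]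
        rw [hc1, Bool.true_and, pvF_nil]
        by_cases hp : (pending || PySem.Chars.isdigit c) = true
        · rw [if_pos hp, if_pos hp, pvFA_nil]; ring
        · rw [if_neg (by rw [Bool.eq_false_iff.2 hp]; simp),
            if_neg (by rw [Bool.eq_false_iff.2 hp]; simp), pvFA_nil]
      | cons x xs =>
        have hc1 : (c == ' ' || pvOps.contains c || (x :: xs).isEmpty) = false := by
          rw [hsepf, List.isEmpty_cons, Bool.false_or]
        rw [hc1, Bool.false_and, if_neg (by simp)]
        exact ih _ (Or.inr (List.cons_ne_nil x xs))

-- splitOn.go on the one-character separator [' '] is pvSp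
theorem pvGo_sp (fuel : Nat) :
    ∀ (l cur : List Char) (acc : List (List Char)), l.length < fuel →
      PySem.Chars.splitOn.go [' '] fuel l cur acc = acc.reverse ++ pvSp cur l := by
  induction fuel with
  | zero => intro l cur acc h; omega
  | succ n ih =>
    intro l cur acc h
    cases l with
    | nil => simp [PySem.Chars.splitOn.go, pvSp]
    | cons c rest =>
      by_cases hc : c = ' '
      · subst hc
        rw [show PySem.Chars.splitOn.go [' '] (n+1) (' ' :: rest) cur acc
            = PySem.Chars.splitOn.go [' '] n (List.drop 1 (' ' :: rest)) [] (cur.reverse :: acc) from by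
          simp [PySem.Chars.splitOn.go, List.isPrefixOf]]
        rw [show List.drop 1 (' ' :: rest) = rest from rfl]
        rw [ih rest [] (cur.reverse :: acc) (by simp at h; omega)]
        simp [pvSp]
      · have hpre : List.isPrefixOf [' '] (c :: rest) = false := by
          simp [List.isPrefixOf]
          exact fun h' => hc h'.symm
        rw [show PySem.Chars.splitOn.go [' '] (n+1) (c :: rest) cur acc
            = PySem.Chars.splitOn.go [' '] n rest (c :: cur) acc from by
          simp [PySem.Chars.splitOn.go, hpre]]
        rw [ih rest (c :: cur) acc (by simp at h; omega)]
        simp [pvSp, hc]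

theorem pvSplitOn_sp (l : List Char) :
    PySem.Chars.splitOn l [' '] = pvSp [] l := by
  have := pvGo_sp (l.length + 1) l [] [] (by omega)
  simpa [PySem.Chars.splitOn] using this

-- the operator-count fold is pvOpc
theorem pvFold_opc (l : List Char) : ∀ a : Int,
    l.foldl (fun acc ch => acc + (if pvOps.contains ch then 1 else 0)) a = a + pvOpc l := by
  induction l with
  | nil => intro a; simp [pvOpc]
  | cons c l ih =>
    intro a
    simp only [List.foldl, pvOpc, ih]
    ring

-- the digit-token fold over pvSp of the cleaned list is pvF
theorem pvFold_tokens (l : List Char) : ∀ (cur : List Char) (a : Int),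
    ((pvSp cur (l.map (fun ch => if pvOps.contains ch then ' ' else ch))).foldl
        (fun acc t => acc + (if t.any PySem.Chars.isdigit then 1 else 0)) a)
      = a + pvF (cur.any PySem.Chars.isdigit) l := by
  induction l with
  | nil => intro cur a; simp [pvSp, pvF]
  | cons c l ih =>
    intro cur a
    by_cases hsep : (c == ' ' || pvOps.contains c) = true
    · have hm : (if pvOps.contains c then ' ' else c) = ' ' := by
        rcases Bool.or_eq_true_iff.1 hsep with h | h
        · have : c = ' ' := beq_iff_eq.1 h
          subst this
          split <;> rfl
        · exact if_pos h
      simp only [List.map, hm, pvSp, beq_self_eq_true, if_true, List.foldl]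
      rw [show pvF (cur.any PySem.Chars.isdigit) (c :: l)
          = (if cur.any PySem.Chars.isdigit then 1 else 0) + pvF false l from by
        simp only [pvF]; rw [if_pos hsep]]
      rw [ih [] (a + (if cur.reverse.any PySem.Chars.isdigit then 1 else 0))]
      simp [List.any_reverse]
      ring
    · have hor := Bool.or_eq_false_iff.1 (Bool.eq_false_iff.2 (fun h => hsep h))
      have hop : pvOps.contains c = false := hor.2
      have hspc : (c == ' ') = false := hor.1
      simp only [List.map, hop, Bool.false_eq_true, if_false, pvSp, hspc]
      rw [show pvF (cur.any PySem.Chars.isdigit) (c :: l)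
          = pvF (cur.any PySem.Chars.isdigit || PySem.Chars.isdigit c) l from by
        simp only [pvF]; rw [if_neg (fun h => hsep h)]]
      rw [ih (c :: cur) a]
      simp [List.any, Bool.or_comm]

-- the step of A's loop, with the length of the full list as parameter n
def pvStep (n : Int) (st : Int × Int × List Char) (ic : Int × Char) : Int × Int × List Char :=
  let mem_number :=
    if PySem.Chars.isdigit ic.2 then st.2.2 ++ [ic.2] else st.2.2
  let p :=
    if (ic.2 == ' ' || pvOps.contains ic.2 || ic.1 == n - 1) && !mem_number.isEmpty then
      (st.1 + 1, ([] : List Char))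
    else (st.1, mem_number)
  let count_characters :=
    if pvOps.contains ic.2 then st.2.1 + 1 else st.2.1
  (p.1, count_characters, p.2)

-- A's loop computes pvFA + pvOpc under the index invariant i + |l| = n
theorem pvA_loop (n : Int) (l : List Char) : ∀ (i cn cc : Int) (mem : List Char),
    i + l.length = n →
    (((PySem.List.enumerate l i).foldl (pvStep n) (cn, cc, mem)).1
      + ((PySem.List.enumerate l i).foldl (pvStep n) (cn, cc, mem)).2.1)
      = cn + cc + pvFA (!mem.isEmpty) l + pvOpc l := by
  induction l with
  | nil =>
    intro i cn cc mem _
    simp [PySem.List.enumerate_nil, pvFA, pvOpc]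
  | cons c rest ih =>
    intro i cn cc mem hinv
    rw [PySem.List.enumerate_cons, List.foldl_cons]
    have hb : (i == n - 1) = rest.isEmpty := by
      cases rest with
      | nil => simp only [List.length_cons, List.length_nil] at hinv; simp; omega
      | cons x xs =>
        simp only [List.length_cons] at hinv
        have : i ≠ n - 1 := by push_cast at hinv; omega
        simp [this]
    have hinv' : i + 1 + (rest.length : Int) = n := by
      simp only [List.length_cons] at hinv; push_cast at hinv ⊢; omega
    have hmem1 : (!(if PySem.Chars.isdigit c then mem ++ [c] else mem).isEmpty)
        = (!mem.isEmpty || PySem.Chars.isdigit c) := by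
      by_cases hd : PySem.Chars.isdigit c = true
      · simp [hd]
      · rw [Bool.eq_false_iff.2 hd]; simp
    by_cases hcond : ((c == ' ' || pvOps.contains c || rest.isEmpty)
        && (!mem.isEmpty || PySem.Chars.isdigit c)) = true
    · have hstep : pvStep n (cn, cc, mem) (i, c)
          = (cn + 1, (if pvOps.contains c then cc + 1 else cc), ([] : List Char)) := by
        simp only [pvStep, hb, hmem1]
        rw [if_pos hcond]
      rw [hstep, ih (i + 1) (cn + 1) (if pvOps.contains c then cc + 1 else cc) [] hinv']
      rw [show pvFA (!mem.isEmpty) (c :: rest) = 1 + pvFA false rest from by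
        simp only [pvFA]; rw [if_pos hcond]]
      simp only [pvOpc, List.isEmpty_nil, Bool.not_true]
      by_cases hop : pvOps.contains c = true
      · rw [hop]; simp only [if_true]; ring
      · rw [Bool.eq_false_iff.2 hop]; simp only [Bool.false_eq_true, if_false]; ring
    · have hcond' := Bool.eq_false_iff.2 (fun h => hcond h)
      have hstep : pvStep n (cn, cc, mem) (i, c)
          = (cn, (if pvOps.contains c then cc + 1 else cc),
             (if PySem.Chars.isdigit c then mem ++ [c] else mem)) := by
        simp only [pvStep, hb, hmem1]
        rw [if_neg hcond]
      rw [hstep,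
        ih (i + 1) cn (if pvOps.contains c then cc + 1 else cc)
          (if PySem.Chars.isdigit c then mem ++ [c] else mem) hinv',
        hmem1]
      rw [show pvFA (!mem.isEmpty) (c :: rest)
          = pvFA (!mem.isEmpty || PySem.Chars.isdigit c) rest from by
        simp only [pvFA]; rw [if_neg hcond]]
      simp only [pvOpc]
      by_cases hop : pvOps.contains c = true
      · rw [hop]; simp only [if_true]; ring
      · rw [Bool.eq_false_iff.2 hop]; simp only [Bool.false_eq_true, if_false]; ring

-- ===== VERDICT (by name: the statement is the Claim_ definition above) =====
theorem count_math_spec : Claim_equal_count_math := by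
  intro s _
  unfold Spec_count_math
  have hA : count_math s
      = (((PySem.List.enumerate s.toList).foldl (pvStep (s.toList.length : Int)) (0, 0, [])).1
        + ((PySem.List.enumerate s.toList).foldl (pvStep (s.toList.length : Int)) (0, 0, [])).2.1) := by
    rfl
  have hloop := pvA_loop (s.toList.length : Int) s.toList 0 0 0 [] (by simp)
  have hB : count_math_alt s
      = ((PySem.Chars.splitOn (s.toList.map (fun ch => if pvOps.contains ch then ' ' else ch)) [' ']).foldl
          (fun acc t => acc + (if t.any PySem.Chars.isdigit then 1 else 0)) 0)
        + (s.toList.foldl (fun acc ch => acc + (if pvOps.contains ch then 1 else 0)) 0) := by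
    rfl
  rw [hA, hloop, hB, pvSplitOn_sp, pvFold_tokens s.toList [] 0, pvFold_opc s.toList 0]
  rw [show (! ([] : List Char).isEmpty) = false from rfl,
    show (([] : List Char).any PySem.Chars.isdigit) = false from rfl,
    pvFA_pvF s.toList false (Or.inl rfl)]
  ring
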